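-- pv_equiv track=rewrite | github.com/xuiltul/animaworks | core/agent.py | _extract_message_from_prompt
-- ===== SOURCE A (Python) =====
-- def _extract_message_from_prompt(prompt: str) -> str:
--     """Extract the latest message content from a chat prompt.
--
--     The prompt from ConversationMemory.build_chat_prompt() has format:
--     - If no history: just the message content
--     - If history: conversation history + separator + latest message
--
--     We want to extract just the latest message for keyword extraction.
--     """
--     # Look for the pattern "**[HH:MM] from_person:**" which marks conversation history
--     # The actual message is typically after the last history entry
--     lines = prompt.strip().splitlines()
--
--     # If there's no history marker, the whole prompt is the message
--     if not any("**[" in line and "]" in line and ":**" in line for line in lines):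
--         return prompt
--
--     # Find the last content block after history
--     # Heuristic: take last paragraph that doesn't look like a history entry
--     in_content = False
--     content_lines = []
--     for line in reversed(lines):
--         if line.startswith("**[") and "]" in line and ":**" in line:
--             # Hit a history entry, stop
--             break
--         if line.strip():
--             content_lines.insert(0, line)
--
--     return "\n".join(content_lines) if content_lines else prompt
-- ===== SOURCE B (Python) =====
-- def _extract_message_from_prompt(prompt: str) -> str:
--     """Single forward pass: remember whether any history marker appears and the
--     index of the last line that *starts* a history entry, then slice the tail."""
--     lines = prompt.strip().splitlines()
--     has_marker = False
--     last_idx = -1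
--     for i, line in enumerate(lines):
--         if "**[" in line and "]" in line and ":**" in line:
--             has_marker = True
--         if line.startswith("**[") and "]" in line and ":**" in line:
--             last_idx = i
--     if not has_marker:
--         return prompt
--     tail = [ln for ln in lines[last_idx + 1:] if ln.strip()]
--     return "\n".join(tail) if tail else prompt
-- ===== Notes on version B (the rewrite author's own statement) =====
-- stated objective: alternative
-- what changed: Replaces the reversed iteration with break and insert(0) accumulation by a single forward enumerate pass that records the last history-entry index, then slices lines[last_idx+1:] and filters blanks.
import Mathlib
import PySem

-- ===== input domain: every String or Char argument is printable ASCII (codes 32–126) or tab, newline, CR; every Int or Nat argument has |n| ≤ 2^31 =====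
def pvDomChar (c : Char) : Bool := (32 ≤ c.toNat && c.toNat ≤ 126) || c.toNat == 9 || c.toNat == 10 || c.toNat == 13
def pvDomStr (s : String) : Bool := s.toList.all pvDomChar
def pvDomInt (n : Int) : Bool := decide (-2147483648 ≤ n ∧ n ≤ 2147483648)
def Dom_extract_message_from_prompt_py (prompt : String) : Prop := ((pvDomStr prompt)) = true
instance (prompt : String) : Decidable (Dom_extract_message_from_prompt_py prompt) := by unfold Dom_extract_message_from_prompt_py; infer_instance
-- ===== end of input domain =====

-- B replaces A's reversed-with-break accumulation by one forward enumerate pass recording the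
-- last history-entry index, then a slice-and-filter of the tail (objective: alternative decomposition).

-- ===== PORT A =====
-- the reversed-loop of A: break on a history-entry line, else insert(0, line) (= cons) when line.strip() is truthy
def pvA_loop : List String → List String → List String
  | [], acc => acc
  | line :: rest, acc =>
    if PySem.Str.startswith line "**[" && PySem.Str.isIn "]" line && PySem.Str.isIn ":**" line then
      acc
    else if PySem.Str.strip line ≠ "" then pvA_loop rest (line :: acc)
    else pvA_loop rest acc

def extract_message_from_prompt_py (prompt : String) : String :=
  let lines := PySem.Str.splitlines (PySem.Str.strip prompt)
  if !(lines.any fun line => PySem.Str.isIn "**[" line && PySem.Str.isIn "]" line && PySem.Str.isIn ":**" line) then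
    prompt
  else
    let content_lines := pvA_loop lines.reverse []
    if content_lines ≠ [] then PySem.Str.join "\n" content_lines else prompt

-- ===== PORT B =====
-- state = (has_marker, last_idx); one step of Source B's forward loop body
def pvB_step (s : Bool × Int) (p : Int × String) : Bool × Int :=
  let s1 := if PySem.Str.isIn "**[" p.2 && PySem.Str.isIn "]" p.2 && PySem.Str.isIn ":**" p.2 then (true, s.2) else s
  if PySem.Str.startswith p.2 "**[" && PySem.Str.isIn "]" p.2 && PySem.Str.isIn ":**" p.2 then (s1.1, p.1) else s1

def extract_message_from_prompt_py_alt (prompt : String) : String :=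
  let lines := PySem.Str.splitlines (PySem.Str.strip prompt)
  let st := (PySem.List.enumerate lines).foldl pvB_step (false, (-1 : Int))
  if !st.1 then prompt
  else
    -- last_idx + 1 ≥ 0 always, so lines[last_idx+1:] is exactly List.drop (last_idx+1).toNat
    let tail := (lines.drop (st.2 + 1).toNat).filter (fun ln => PySem.Str.strip ln ≠ "")
    if tail ≠ [] then PySem.Str.join "\n" tail else prompt

-- ===== PRECONDITION & SPEC =====
def Spec_extract_message_from_prompt_py (prompt : String) (out : String) : Prop := out = extract_message_from_prompt_py_alt prompt
instance (prompt : String) (out : String) : Decidable (Spec_extract_message_from_prompt_py prompt out) := by unfold Spec_extract_message_from_prompt_py; infer_instance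

-- ===== CLAIM (what is proved, stated in full; the proofs are below) =====
def Claim_equal_extract_message_from_prompt_py : Prop := ∀ (prompt : String), Dom_extract_message_from_prompt_py prompt → Spec_extract_message_from_prompt_py prompt (extract_message_from_prompt_py prompt)

-- ===== LEMMAS AND PROOFS =====

-- abbreviations for the two conditions (used only in the proofs)
def pvMark (line : String) : Bool := PySem.Str.isIn "**[" line && PySem.Str.isIn "]" line && PySem.Str.isIn ":**" line
def pvBrk (line : String) : Bool := PySem.Str.startswith line "**[" && PySem.Str.isIn "]" line && PySem.Str.isIn ":**" line
def pvSt (l : List String) : Bool × Int := (PySem.List.enumerate l).foldl pvB_step (false, (-1 : Int))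

theorem pvB_step_eq (s : Bool × Int) (i : Int) (x : String) :
    pvB_step s (i, x) = (s.1 || pvMark x, if pvBrk x then i else s.2) := by
  obtain ⟨a, b⟩ := s
  unfold pvB_step pvMark pvBrk
  cases hm : (PySem.Str.isIn "**[" x && PySem.Str.isIn "]" x && PySem.Str.isIn ":**" x) <;>
    cases hbk : (PySem.Str.startswith x "**[" && PySem.Str.isIn "]" x && PySem.Str.isIn ":**" x) <;>
    simp

theorem pvSt_append (l : List String) (x : String) :
    pvSt (l ++ [x]) = pvB_step (pvSt l) ((l.length : Int), x) := by
  simp [pvSt, PySem.List.enumerate_append, List.foldl_append, PySem.List.enumerate]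

theorem pvSt_fst (l : List String) : (pvSt l).1 = l.any pvMark := by
  induction l using List.reverseRecOn with
  | nil => simp [pvSt, PySem.List.enumerate]
  | append_singleton l x ih =>
      rw [pvSt_append, pvB_step_eq, ih]
      by_cases h : pvBrk x <;> simp

theorem pvSt_snd_bounds (l : List String) : -1 ≤ (pvSt l).2 ∧ (pvSt l).2 < l.length := by
  induction l using List.reverseRecOn with
  | nil => simp [pvSt, PySem.List.enumerate]
  | append_singleton l x ih =>
      rw [pvSt_append, pvB_step_eq]
      by_cases h : pvBrk x
      · simp [h]
      · simp [h]
        omega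

theorem pvMain (l : List String) : ∀ acc, pvA_loop l.reverse acc =
    ((l.drop ((pvSt l).2 + 1).toNat).filter (fun ln => PySem.Str.strip ln ≠ "")) ++ acc := by
  induction l using List.reverseRecOn with
  | nil => intro acc; simp [pvA_loop, pvSt, PySem.List.enumerate]
  | append_singleton l x ih =>
      intro acc
      rw [pvSt_append, pvB_step_eq]
      have hb := pvSt_snd_bounds l
      simp only [List.reverse_append, List.reverse_singleton, List.singleton_append]
      by_cases h2 : pvBrk x
      · -- break on x: last_idx becomes l.length, the tail slice is empty
        rw [if_pos h2]
        have hcond : (PySem.Str.startswith x "**[" && PySem.Str.isIn "]" x && PySem.Str.isIn ":**" x) = true := h2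
        have hn : ((l.length : Int) + 1).toNat = l.length + 1 := by omega
        have hdrop : (l ++ [x]).drop (l.length + 1) = [] :=
          List.drop_eq_nil_of_le (by simp)
        simp only [pvA_loop]
        rw [hcond, hn, hdrop]
        simp
      · rw [if_neg h2]
        have hcond : (PySem.Str.startswith x "**[" && PySem.Str.isIn "]" x && PySem.Str.isIn ":**" x) = false := by
          simpa [pvBrk] using h2
        have hk : ((pvSt l).2 + 1).toNat ≤ l.length := by omega
        have hdrop : (l ++ [x]).drop ((pvSt l).2 + 1).toNat
            = l.drop ((pvSt l).2 + 1).toNat ++ [x] :=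
          List.drop_append_of_le_length hk
        simp only [pvA_loop]
        rw [hcond, hdrop]
        by_cases hs : PySem.Str.strip x ≠ ""
        · simp [hs, ih, List.filter_append]
        · simp [hs, ih, List.filter_append]

-- ===== VERDICT (by name: the statement is the Claim_ definition above) =====
theorem extract_message_from_prompt_py_spec : Claim_equal_extract_message_from_prompt_py := by
  intro prompt _
  show extract_message_from_prompt_py prompt = extract_message_from_prompt_py_alt prompt
  unfold extract_message_from_prompt_py extract_message_from_prompt_py_alt
  have hfst : (List.foldl pvB_step (false, (-1 : Int))
      (PySem.List.enumerate (PySem.Str.splitlines (PySem.Str.strip prompt)))).1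
      = (PySem.Str.splitlines (PySem.Str.strip prompt)).any
          (fun line => PySem.Str.isIn "**[" line && PySem.Str.isIn "]" line && PySem.Str.isIn ":**" line) :=
    pvSt_fst (PySem.Str.splitlines (PySem.Str.strip prompt))
  have hmain : pvA_loop (PySem.Str.splitlines (PySem.Str.strip prompt)).reverse []
      = ((PySem.Str.splitlines (PySem.Str.strip prompt)).drop
          (((List.foldl pvB_step (false, (-1 : Int))
              (PySem.List.enumerate (PySem.Str.splitlines (PySem.Str.strip prompt)))).2 + 1).toNat)).filter
          (fun ln => PySem.Str.strip ln ≠ "") := by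
    simpa using pvMain (PySem.Str.splitlines (PySem.Str.strip prompt)) []
  simp only [hfst, hmain]
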